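/- GENERATED by tools/from_farm_form.py from prooffarm-gif/accepted/gif_decode.5/Lemmas.lean (a worked proof of the farm's unit `gif_decode.5`,
   accepted by the verdict) — do not edit. -/
import Gif.Spec.Units.gif_decode_5
import Gif.Spec.AllSegs

/-!
  Lemmas for the unit `gif_decode.5` (the last body segment of the driver's protected function: 0x10af93 … 0x10afdb,
  gif_driver.c:223-226): `error = 0`, `DGifCloseFile(gif, &error)`, the three checked stores `report->close_result`,
  `report->close_error`, `report->consumed`. DGifCloseFile's return address 0x10afa8 (`ret28`) is not a cut of the design: the unit
  makes it one of its own (as farm.gif/worked/gif_decode.2 does for DGifOpen).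

      gd5_AtRet28      the assertion at `ret28`: `Core` + the heap `H'` DGifCloseFile left with its invariant (NO forest any more)
      gd5_seg_call     0x10af93 … the store `error = 0` … `call DGifCloseFile` … 0x10afa8 (`gd5_AtRet28`)
      gd5_seg_tail     0x10afa8 … the three checked stores into the report … 0x10afdb (`Done`)

  THE TREE'S LEMMAS IT USES (nothing general is proved here):
      HeapPre.at_call                  `HeapPre` at the callee's entry from `Open.inv` and ONE stack window                FrameCarry.lean §5
      GifOK.sameExcept, Loose.stack    the state invariant through the same window (below the cursor)                      Common.lean
      HeapInv.stack_windows            `HeapInv` through the check calls' return addresses and the report                  FrameCarry.lean §5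
      gif_decode.Core.carry            `Core` behind the callee and at the exit, from a footprint of `gif_decode.BodyWin`s  DriverCarry.lean §2
      gif_decode.ctx, .report_above, .reportLive                                                                           Seg_gif_decode.lean
-/

open X86 X86.User Asan ProgX.Base ProgX.Base.Spec Gif.Spec

set_option maxRecDepth 4000
set_option maxHeartbeats 4000000

namespace Gif.Spec.gif_decode_5

/-- **At 10AFA8H (ret28), `DGifCloseFile(gif, &error)` has returned**: `Core`; A heap `H'` at the place of `H` with its invariant, the
own frame active, the clean stack ending at the body's `rsp`. There is no forest any more (every object of it is freed). -/
structure gd5_AtRet28 (H : Heap) (rest : List Obj) (frames : List (Nat × FrameLayout)) (u₀ e : State)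
    (ret : Word) (v : State) : Prop where
  core : gif_decode.Core Gif.L.gif_decode.ret28 H rest frames u₀ e ret v
  heap : ∃ H', SameRegion H H' ∧
    HeapInv H' rest (gif_decode.framesIn frames e) ((e.reg .rsp).toNat - 136) v.mem

/-- **10AF93H … the call of DGifCloseFile … 10AFA8H (ret28)** (gif_driver.c:223-224): the unchecked store `error = 0`
(`[rsp+0x30]` = RA − 88: the own frame's object, 12 bytes below the cursor); `rsi = &error`, `rdi = gif`. DGifCloseFile's
precondition: `Env` (`HeapPre.at_call`, `gif_decode.ctx`, `GifOK.sameExcept` over ONE stack window below the cursor), `rdi = Fc.gif`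
(`Held.rbp`), `ErrPtr` (the first object of the own frame). Behind the call `Core` by `Core.carry`: the store, the pushed return
address and DGifCloseFile's footprint (its stack, the heap's region and shadow, `error`) lie below RA − 56 or in `[800000H, 1000020H)`. -/
theorem gd5_seg_call (Lay : Layout) (hLay : Lay.hi = 0x1000000) (μ : Microarch) (hμ : UserX.MicroOK μ) (u₀ : State)
    (hcode : HasCodeNat Lay u₀ Gif.L.gif_decode.entry Gif.Code.code_gif_decode.nat Gif.L.gif_decode.size)
    (H : Heap) (rest : List Obj) (frames : List (Nat × FrameLayout)) (Hc : Heap) (Fc : Forest) (e : State) (ret : Word)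
    (h_DGifCloseFile : Calls Lay μ ProgX.Base.WayInv (ProgX.Base.conv u₀) Gif.L.DGifCloseFile.entry
      (Gif.Spec.DGifCloseFile.spec Hc rest (gif_decode.framesIn frames e) Fc (gif_decode.reader e)))
    (v : State) (hat : gif_decode.Held Gif.L.gif_decode.at_10af93 H rest frames Hc Fc u₀ e ret v) :
    ReachVia Lay μ ProgX.Base.WayInv v (gd5_AtRet28 H rest frames u₀ e ret) := by
  -- 1. THE PRELUDE OF A BODY SEGMENT OF THE DRIVER: `Core` stays whole (fields by projection), only its `pre` is taken apart
  obtain ⟨⟨hcore, hreg, hinv, hok, hcomplete⟩, h_rbp⟩ := hat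
  have he := hcore.entry
  v_entry he
  have hpre := hcore.pre
  obtain ⟨hheap, hglob, hconsts0, hin, hrep, hrep_lo, hrep_hi⟩ := hcore.pre
  have w_rip := hcore.rip
  have c_rsp : v.reg .rsp = e.reg .rsp - 136 := hcore.rsp
  have c_r13 : v.reg .r13 = e.reg .rdi := hcore.r13
  have c_rbx : v.reg .rbx = e.reg .rdx := hcore.rbx
  have w_kept : RegsKept [.rsp] v v := RegsKept.refl _ _
  have w_eq : Mem.EqOn ProgX.Base.L.textLo ProgX.Base.L.textHi u₀.mem v.mem := ProgX.Base.conv_code_eqOn hcore.code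
  have hdf := (show abiInv _ from hcore.abi).1
  have hmx := (show abiInv _ from hcore.abi).2
  have hsse := ProgX.Base.sseOK_of_abiInv hcore.abi
  -- the report lies at or above RA + 8 (BEFORE the walk: the placement of every store uses it)
  have hrab := gif_decode.report_above hpre
  -- 2. THE WALK, to the call's return address (a private cut)
  u_walk hcode [hμ.vendor] until [Gif.L.gif_decode.ret28] span [ProgX.Base.L.textLo, ProgX.Base.L.textHi] side (v_side)
  case call_inv =>
    v_inv
  case pre_10afa3 =>
    -- 3. DGIFCLOSEFILE'S PRECONDITION. Two stack stores since `v`: `error = 0` (own frame, RA − 88), the return address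
    have hctx : Ctx rest (gif_decode.framesIn frames e) (gif_decode.reader e) := gif_decode.ctx hpre (by omega)
    have hs : Mem.SameExcept [⟨(e.reg .rsp).toNat - 992, (e.reg .rsp).toNat - 72⟩] v.mem s_10afa3.mem := by
      rw [w_mem]
      u_same
    have hpre' : HeapPre Hc rest (gif_decode.framesIn frames e) s_10afa3 := by
      refine HeapPre.at_call hheap hreg hinv hs (by omega) ?_ ?_ ?_
      · rw [w_rsp]
        u_omega
      · rw [w_rsp]
        u_omega
      · rw [w_rsp]
        u_omega
    -- the state invariant: the window lies in the stack region, below the cursor (RA − 72)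
    have hok' : GifOK Hc Fc (gif_decode.reader e) s_10afa3.mem := by
      refine hok.sameExcept hinv.heap ⟨?_, ?_⟩ hs ?_
      · show 0x700000 ≤ (e.reg .rsp).toNat - 72
        omega
      · show (e.reg .rsp).toNat - 72 + 16 ≤ 0x800000
        omega
      · intro w hw
        have hw_eq := List.mem_singleton.mp hw
        rw [hw_eq]
        refine Loose.stack hinv.heap ?_ ?_ ?_
        · show 0x700000 ≤ (e.reg .rsp).toNat - 992
          omega
        · show (e.reg .rsp).toNat - 72 ≤ 0x800000
          omega
        · show (e.reg .rsp).toNat - 72 ≤ (e.reg .rsp).toNat - 72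
          omega
    -- `&error`: the first object of the own frame (base + 48 = RA − 88, 4 bytes), 12 bytes below the cursor
    have ho : (⟨(e.reg .rsp).toNat - 136 + 48, 4, .stack⟩ : Obj) ∈
        Gif.Frames.gif_decode.objsAt ((e.reg .rsp).toNat - 136) := List.mem_cons_self
    have e_rsi : (s_10afa3.reg .rsi).toNat = (e.reg .rsp).toNat - 88 := by
      rw [w_rsi]
      u_omega
    have herr : ErrPtr Hc rest (gif_decode.framesIn frames e) (gif_decode.reader e) (s_10afa3.reg .rsi).toNat := by
      right
      rw [e_rsi]
      refine ⟨LiveIn.own _ ho (by omega) (by omega), by omega, by omega, Or.inl ?_⟩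
      -- (`(reader e).cur` is a number by definition, but `omega` does not reduce it: `show` in numbers)
      show (e.reg .rsp).toNat - 88 + 4 ≤ (e.reg .rsp).toNat - 72
      omega
    -- the three clauses
    refine ⟨⟨hpre', hctx, hok'⟩, ?_, herr⟩
    rw [w_rdi]
    exact h_rbp
  -- 4. 0x10afa8 (ret28): DGIFCLOSEFILE HAS RETURNED, with A heap `H'` and its invariant at the body's stack pointer
  obtain ⟨H', hreg1, hinv1, _, _⟩ := w_post
  have e_top : (s_10afa3.reg .rsp).toNat + 8 = (e.reg .rsp).toNat - 136 := by
    rw [w_rsp_10afa3]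
    u_omega
  rw [e_top] at hinv1
  v_after_call w_rsp_10afa3 w_mem_10afa3
  simp only [w_rsi_10afa3] at w_same
  -- the footprint since `v`: `error` (RA − 88), the pushed return address, DGifCloseFile's stack: all below RA − 56; the heap's
  -- region and shadow
  have hsame1 : Mem.SameExcept
      [⟨(e.reg .rsp).toNat - 992, (e.reg .rsp).toNat - 56⟩,
       ⟨0x800000, 0x1000020⟩] v.mem s_10afa3r.mem := by u_same
  have hwin1 : ∀ x, x ∈ ([⟨(e.reg .rsp).toNat - 992, (e.reg .rsp).toNat - 56⟩, ⟨0x800000, 0x1000020⟩] : List Span) →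
      gif_decode.BodyWin e x := by
    intro x hx
    simp only [List.mem_cons, List.mem_nil_iff, or_false] at hx
    unfold gif_decode.BodyWin
    rcases hx with rfl | rfl
    · left
      simp only
      omega
    · right
      left
      simp only
      omega
  -- `Core` at the returned state: the saved registers, the return address and the constants are met by no window
  have hcore1 := hcore.carry (cut' := Gif.L.gif_decode.ret28) w_rip w_rsp (w_kept.get .r12 rfl) (w_kept.get .r13 rfl)
    (w_kept.get .rbx rfl) (w_kept.get .r15 rfl) hsame1 hwin1 w_code w_inv
  refine ReachVia.done ?_
  exact {
    core := hcore1
    heap := ⟨H', SameRegion.trans hreg hreg1, hinv1⟩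
  }

/-- **10AFA8H (ret28) … 10AFDBH** (gif_driver.c:224-226): `ebp = eax`, the checked store `report->close_result` (`report + 16`);
`ebp = error` (`[rsp+0x30]`), the checked store `report->close_error` (`report + 20`); `rbp = cursor.cur − in` (`[rsp+0x40]`, `r13`),
the checked store `report->consumed` (`report + 48`): the three checks by `gif_decode.reportLive` for the heap `H'`; the six stores
since `ret28` (three return addresses of the check routines, three fields of the report) lie in the stack region:
`HeapInv.stack_windows`; `Core` by `Core.carry`. `Done` with `H'`. (What the report holds is never asked: the loaded values stay
opaque.) -/
theorem gd5_seg_tail (Lay : Layout) (hLay : Lay.hi = 0x1000000) (μ : Microarch) (hμ : UserX.MicroOK μ) (u₀ : State)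
    (hcode : HasCodeNat Lay u₀ Gif.L.gif_decode.entry Gif.Code.code_gif_decode.nat Gif.L.gif_decode.size)
    (H : Heap) (rest : List Obj) (frames : List (Nat × FrameLayout)) (e : State) (ret : Word)
    (h_asan_store4_noabort : Asan.SmallCheck Lay μ ProgX.Base.WayInv (ProgX.Base.CodeOK u₀) [.rax, .rcx, .rdx] 4
      ProgX.Base.L.__asan_store4_noabort.entry)
    (h_asan_store8_noabort : Asan.SmallCheck Lay μ ProgX.Base.WayInv (ProgX.Base.CodeOK u₀) [.rax, .rcx, .rdx] 8
      ProgX.Base.L.__asan_store8_noabort.entry)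
    (v : State) (hat : gd5_AtRet28 H rest frames u₀ e ret v) :
    ReachVia Lay μ ProgX.Base.WayInv v (fun w => ∃ (H' : Heap), gif_decode.Done H rest frames H' u₀ e ret w) := by
  -- 1. THE PRELUDE
  obtain ⟨hcore, H', hreg, hinv⟩ := hat
  have he := hcore.entry
  v_entry he
  have hpre := hcore.pre
  obtain ⟨hheap, hglob, hconsts0, hin, hrep, hrep_lo, hrep_hi⟩ := hcore.pre
  have w_rip := hcore.rip
  have c_rsp : v.reg .rsp = e.reg .rsp - 136 := hcore.rsp
  have c_r13 : v.reg .r13 = e.reg .rdi := hcore.r13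
  have c_rbx : v.reg .rbx = e.reg .rdx := hcore.rbx
  have w_kept : RegsKept [.rsp] v v := RegsKept.refl _ _
  have w_eq : Mem.EqOn ProgX.Base.L.textLo ProgX.Base.L.textHi u₀.mem v.mem := ProgX.Base.conv_code_eqOn hcore.code
  have hdf := (show abiInv _ from hcore.abi).1
  have hmx := (show abiInv _ from hcore.abi).2
  have hsse := ProgX.Base.sseOK_of_abiInv hcore.abi
  -- the report: above RA + 8, and live under the heap of THIS state (both BEFORE the walk)
  have hrab := gif_decode.report_above hpre
  have hrl : LiveIn (H'.liveObjs ++ rest) (gif_decode.framesIn frames e) (e.reg .rdx).toNat 64 :=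
    gif_decode.reportLive hpre H' _ _ _ (Nat.le_refl _) (Nat.le_refl _)
  -- 2. THE WALK, to the exit cut
  u_walk hcode [hμ.vendor] until [Gif.L.gif_decode.at_10afdb] span [ProgX.Base.L.textLo, ProgX.Base.L.textHi] side (v_side)
  case check_10afae =>
    -- gif_driver.c:224 the store of `report->close_result`: 4 bytes inside the report
    have hun : ShadowUntouched v.mem s_10afae.mem := by v_untouched
    exact hrl.accSmall hinv.shadow hun _ 4 (by decide) (by u_omega) (by u_omega)
  case check_10afbe =>
    -- gif_driver.c:225 the store of `report->close_error`: 4 bytes inside the report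
    have hun : ShadowUntouched v.mem s_10afbe.mem := by v_untouched
    exact hrl.accSmall hinv.shadow hun _ 4 (by decide) (by u_omega) (by u_omega)
  case check_10afd2 =>
    -- gif_driver.c:226 the store of `report->consumed`: 8 bytes inside the report
    have hun : ShadowUntouched v.mem s_10afd2.mem := by v_untouched
    exact hrl.accSmall hinv.shadow hun _ 8 (by decide) (by u_omega) (by u_omega)
  -- 3. 0x10afdb: the three results are recorded; the heap is `H'`
  -- the six stores since `v`: three check calls' return addresses (stack), three fields of the report (a caller's stack object)
  have hs : Mem.SameExcept
      [⟨(e.reg .rsp).toNat - 992, (e.reg .rsp).toNat - 136⟩,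
       ⟨(e.reg .rdx).toNat, (e.reg .rdx).toNat + 64⟩] v.mem s_10afd7.mem := by
    rw [w_mem]
    u_same
  have hbase' : H'.base = 0x800000 := hreg.1.trans hheap.base
  -- both windows lie in the stack region: the heap's invariant holds on
  have hoff : ∀ w, w ∈ ([⟨(e.reg .rsp).toNat - 992, (e.reg .rsp).toNat - 136⟩,
      ⟨(e.reg .rdx).toNat, (e.reg .rdx).toNat + 64⟩] : List Span) → 0x700000 ≤ w.lo ∧ w.hi ≤ 0x800000 := by
    intro w hw
    simp only [List.mem_cons, List.mem_nil_iff, or_false] at hw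
    rcases hw with rfl | rfl
    · simp only
      omega
    · exact ⟨hrep_lo, hrep_hi⟩
  obtain ⟨hinv1, _⟩ := hinv.stack_windows hbase' hs hoff
  -- both windows are the body's: `Core` holds on
  have hwin : ∀ x, x ∈ ([⟨(e.reg .rsp).toNat - 992, (e.reg .rsp).toNat - 136⟩,
      ⟨(e.reg .rdx).toNat, (e.reg .rdx).toNat + 64⟩] : List Span) → gif_decode.BodyWin e x := by
    intro x hx
    simp only [List.mem_cons, List.mem_nil_iff, or_false] at hx
    unfold gif_decode.BodyWin
    rcases hx with rfl | rfl
    · left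
      simp only
      omega
    · right
      right
      simp only
      omega
  have habi : (conv u₀).inv s_10afd7 := by
    refine ProgX.Base.abiInv_of ?_ ?_
    · rw [w_flags]
      exact w_df_10afd2
    · rw [w_mxcsr]
      exact hmx
  have hcore' := hcore.carry (cut' := Gif.L.gif_decode.at_10afdb) w_rip w_rsp (w_kept.get .r12 rfl) (w_kept.get .r13 rfl)
    (w_kept.get .rbx rfl) (w_kept.get .r15 rfl) hs hwin (ProgX.Base.conv_code_in w_eq) habi
  refine ReachVia.done ⟨H', ?_⟩
  exact {
    core := hcore'
    region := hreg
    inv := hinv1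
  }

end Gif.Spec.gif_decode_5
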